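-- pv_equiv track=rewrite | github.com/frymor/wot | wot/optimal_transport.py | get_file_basename_and_extension
-- ===== SOURCE A (Python) =====
-- def get_file_basename_and_extension(name):
--     dot_index = name.rfind('.')
--     ext = ''
--     basename = name
--     if dot_index != -1:
--         ext = name[dot_index:]
--         if ext == '.gz':
--             return get_file_basename_and_extension(name[0:dot_index])
--
--     if dot_index != -1:
--         basename = name[0:dot_index]
--     return {'basename': basename, 'ext': ext};
-- ===== SOURCE B (Python) =====
-- def get_file_basename_and_extension(name):
--     while name.endswith('.gz'):
--         name = name[:-3]
--     dot_index = name.rfind('.')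
--     if dot_index != -1:
--         return {'basename': name[:dot_index], 'ext': name[dot_index:]}
--     return {'basename': name, 'ext': ''}
-- ===== Notes on version B (the rewrite author's own statement) =====
-- stated objective: simpler
-- what changed: Replaces A's recursive re-entry (which recomputes rfind and re-splits on every '.gz' layer) with an iterative endswith-loop that strips all trailing '.gz' suffixes first, followed by a single rfind split.
import Mathlib
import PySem

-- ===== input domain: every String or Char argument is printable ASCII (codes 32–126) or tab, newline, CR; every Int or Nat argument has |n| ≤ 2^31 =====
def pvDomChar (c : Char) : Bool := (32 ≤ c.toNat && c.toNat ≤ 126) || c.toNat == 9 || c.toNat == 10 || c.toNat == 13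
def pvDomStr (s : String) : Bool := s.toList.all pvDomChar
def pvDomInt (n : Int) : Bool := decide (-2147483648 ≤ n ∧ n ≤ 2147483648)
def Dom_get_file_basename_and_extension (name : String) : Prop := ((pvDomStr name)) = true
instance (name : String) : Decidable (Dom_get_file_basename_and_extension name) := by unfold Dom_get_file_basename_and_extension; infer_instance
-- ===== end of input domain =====

-- B replaces A's recursive re-entry with an iterative '.gz'-stripping loop followed by a single rfind split (objective: simpler decomposition; same result).


-- lemma the ports need for termination (cited by name in decreasing_by)
theorem rfind_go_cases (s sub : List Char) (n : Nat) :
    PySem.Chars.rfind.go s sub n = -1 ∨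
    (0 ≤ PySem.Chars.rfind.go s sub n ∧ (PySem.Chars.rfind.go s sub n).toNat ≤ n ∧
      sub.isPrefixOf (s.drop (PySem.Chars.rfind.go s sub n).toNat) = true) := by
  induction n with
  | zero =>
      simp only [PySem.Chars.rfind.go]
      split_ifs with h
      · right; simpa using h
      · left; rfl
  | succ j ih =>
      simp only [PySem.Chars.rfind.go]
      split_ifs with h
      · right
        refine ⟨by positivity, ?_, ?_⟩
        · simp
        · simpa using h
      · rcases ih with h1 | ⟨h1, h2, h3⟩
        · left; exact h1
        · right; exact ⟨h1, Nat.le_succ_of_le h2, h3⟩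

theorem rfind_cases (s sub : List Char) :
    PySem.Chars.rfind s sub = -1 ∨
    (0 ≤ PySem.Chars.rfind s sub ∧ (PySem.Chars.rfind s sub).toNat ≤ s.length ∧
      sub.isPrefixOf (s.drop (PySem.Chars.rfind s sub).toNat) = true) :=
  rfind_go_cases s sub s.length

-- ===== PORT A =====
def get_file_basename_and_extension (name : String) : List (String × String) :=
  let dot_index := PySem.Str.rfind name "."
  let ext : String := ""
  let basename := name
  if h1 : dot_index ≠ -1 then
    let ext := PySem.Str.slice name (some dot_index) none
    if h2 : ext = ".gz" then
      get_file_basename_and_extension (PySem.Str.slice name (some 0) (some dot_index))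
    else
      [("basename", PySem.Str.slice name (some 0) (some dot_index)), ("ext", ext)]
  else
    [("basename", basename), ("ext", ext)]
termination_by name.toList.length
decreasing_by
  rcases rfind_cases name.toList ".".toList with hc | ⟨hnn, hle, hpre⟩
  · exact absurd (by simpa using hc) h1
  · obtain ⟨k, hk⟩ : ∃ k : ℕ, PySem.Str.rfind name "." = (k : Int) :=
      ⟨(PySem.Str.rfind name ".").toNat, by rw [PySem.Str.rfind_eq]; omega⟩
    have h2'' : PySem.List.slice name.toList (some ((k : Nat) : Int)) none = ".gz".toList := by
      rw [← hk]
      have h2' := congrArg String.toList h2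
      rw [PySem.Str.toList_slice, PySem.Chars.slice] at h2'
      exact h2'
    rw [PySem.List.slice_from_natCast] at h2''
    have hlen3 : name.toList.length - k = 3 := by
      have := congrArg List.length h2''
      rw [List.length_drop] at this
      simpa using this
    have hlt : k < name.toList.length := by omega
    have hA : (PySem.Str.slice name (some 0) (some (PySem.Str.rfind name "."))).toList
        = name.toList.take k := by
      rw [hk, PySem.Str.toList_slice, PySem.Chars.slice]
      rw [show ((0 : Int)) = ((0 : Nat) : Int) from rfl, PySem.List.slice_natCast]
      simp
    rw [hA, List.length_take]
    omega

-- ===== PORT B =====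
def stripGz (name : String) : String :=
  if PySem.Str.endswith name ".gz" then stripGz (PySem.Str.slice name none (some (-3)))
  else name
termination_by name.toList.length
decreasing_by
  have hsuf : ".gz".toList <:+ name.toList := by
    have := (PySem.Chars.endswith_iff name.toList ".gz".toList).mp (by simpa using ‹_›)
    exact this
  have h3 : 3 ≤ name.toList.length := by
    have := hsuf.length_le
    simpa using this
  have : (PySem.Str.slice name none (some (-3))).toList
      = name.toList.take (name.toList.length - 3) := by
    simp only [PySem.Str.toList_slice, PySem.Chars.slice]
    rw [PySem.List.slice_to_neg_ofNat _ 3 (by omega)]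
  rw [this, List.length_take]
  omega

def get_file_basename_and_extension_alt (name : String) : List (String × String) :=
  let name := stripGz name
  let dot_index := PySem.Str.rfind name "."
  if dot_index ≠ -1 then
    [("basename", PySem.Str.slice name none (some dot_index)),
     ("ext", PySem.Str.slice name (some dot_index) none)]
  else
    [("basename", name), ("ext", "")]

-- ===== PRECONDITION & SPEC =====
def Spec_get_file_basename_and_extension (name : String) (out : List (String × String)) : Prop := out = get_file_basename_and_extension_alt name
instance (name : String) (out : List (String × String)) : Decidable (Spec_get_file_basename_and_extension name out) := by unfold Spec_get_file_basename_and_extension; infer_instance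

-- ===== CLAIM (what is proved, stated in full; the proofs are below) =====
def Claim_equal_get_file_basename_and_extension : Prop := ∀ (name : String), Dom_get_file_basename_and_extension name → Spec_get_file_basename_and_extension name (get_file_basename_and_extension name)

-- ===== LEMMAS AND PROOFS =====

-- rfind.go finds the HIGHEST index ≤ n at which sub is a prefix of the drop
theorem rfind_go_eq (s sub : List Char) (k n : Nat) (hk : k ≤ n)
    (h1 : sub.isPrefixOf (s.drop k) = true)
    (h2 : ∀ j, k < j → j ≤ n → sub.isPrefixOf (s.drop j) = false) :
    PySem.Chars.rfind.go s sub n = (k : Int) := by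
  induction n with
  | zero =>
      interval_cases k
      simp only [PySem.Chars.rfind.go]
      simpa using h1
  | succ j ih =>
      simp only [PySem.Chars.rfind.go]
      by_cases hkj : k = j + 1
      · subst hkj
        simp [h1]
      · have hk' : k ≤ j := by omega
        have hfalse : sub.isPrefixOf (s.drop (j + 1)) = false := h2 (j + 1) (by omega) le_rfl
        rw [if_neg (by simp [hfalse])]
        exact ih hk' (fun m hm1 hm2 => h2 m hm1 (by omega))

theorem rfind_dot_gz (t : List Char) :
    PySem.Chars.rfind (t ++ ['.', 'g', 'z']) ['.'] = (t.length : Int) := by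
  unfold PySem.Chars.rfind
  have hlen : (t ++ ['.', 'g', 'z']).length = t.length + 3 := by simp
  rw [hlen]
  apply rfind_go_eq
  · omega
  · simp
  · intro j hj1 hj2
    obtain ⟨m, rfl⟩ : ∃ m, j = t.length + m := ⟨j - t.length, by omega⟩
    have hm1 : 1 ≤ m := by omega
    have hm2 : m ≤ 3 := by omega
    have hdrop : (t ++ ['.', 'g', 'z']).drop (t.length + m) = List.drop m ['.', 'g', 'z'] := by
      rw [List.drop_append, List.drop_eq_nil_of_le (by omega), Nat.add_sub_cancel_left,
        List.nil_append]
    rw [hdrop]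
    interval_cases m <;> decide

theorem stripGz_gz (s : String) (h : PySem.Str.endswith s ".gz" = true) :
    stripGz s = stripGz (PySem.Str.slice s none (some (-3))) := by
  conv_lhs => rw [stripGz.eq_def]
  rw [if_pos h]

theorem stripGz_id (s : String) (h : PySem.Str.endswith s ".gz" = false) :
    stripGz s = s := by
  conv_lhs => rw [stripGz.eq_def]
  rw [if_neg (by simpa using h)]

theorem toList_slice_take (s : String) (t : List Char) (hs : s.toList = t ++ ['.', 'g', 'z']) :
    (PySem.Str.slice s (some 0) (some ((t.length : Nat) : Int))).toList = t := by
  simp only [PySem.Str.toList_slice, PySem.Chars.slice, hs]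
  simp [PySem.List.slice_toNat]

theorem ofList_eq_of_toList {s : String} {l : List Char} (h : s.toList = l) :
    s = String.ofList l := by
  cases h; simp

theorem A_step_gz (s : String) (t : List Char) (hs : s.toList = t ++ ['.', 'g', 'z']) :
    get_file_basename_and_extension s = get_file_basename_and_extension (String.ofList t) := by
  have hr : PySem.Str.rfind s "." = (t.length : Int) := by
    simp only [PySem.Str.rfind_eq, hs]
    have : ".".toList = ['.'] := by decide
    rw [this, rfind_dot_gz]
  have hext : PySem.Str.slice s (some ((t.length : Nat) : Int)) none = ".gz" := by
    apply (ofList_eq_of_toList (l := ".gz".toList) ?_).trans (by simp)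
    simp only [PySem.Str.toList_slice, PySem.Chars.slice, hs]
    rw [PySem.List.slice_from_natCast]
    simp
  rw [get_file_basename_and_extension]
  simp only [hr]
  rw [dif_pos (by omega : ((t.length : Nat) : Int) ≠ -1)]
  rw [dif_pos hext]
  congr 1
  exact ofList_eq_of_toList (toList_slice_take s t hs)

theorem B_step_gz (s : String) (t : List Char) (hs : s.toList = t ++ ['.', 'g', 'z']) :
    stripGz s = stripGz (String.ofList t) := by
  have hend : PySem.Str.endswith s ".gz" = true := by
    simp only [PySem.Str.endswith_eq]
    exact (PySem.Chars.endswith_iff _ _).mpr ⟨t, by simpa using hs.symm⟩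
  rw [stripGz_gz s hend]
  congr 1
  apply ofList_eq_of_toList
  simp only [PySem.Str.toList_slice, PySem.Chars.slice, hs]
  rw [PySem.List.slice_to_neg_ofNat _ 3 (by omega)]
  simp

theorem no_gz_ext (s : String) (hend : PySem.Str.endswith s ".gz" = false)
    (d : Int) (hd : 0 ≤ d) :
    PySem.Str.slice s (some d) none ≠ ".gz" := by
  lift d to ℕ using hd with k
  intro hcontra
  have h := congrArg String.toList hcontra
  rw [PySem.Str.toList_slice, PySem.Chars.slice, PySem.List.slice_from_natCast] at h
  have hsuf : ".gz".toList <:+ s.toList := h ▸ List.drop_suffix _ _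
  have := (PySem.Chars.endswith_iff s.toList ".gz".toList).mpr hsuf
  simp only [PySem.Str.endswith_eq] at hend
  rw [hend] at this
  exact Bool.false_ne_true this

theorem A_eq_alt_no_gz (s : String) (hend : PySem.Str.endswith s ".gz" = false) :
    get_file_basename_and_extension s = get_file_basename_and_extension_alt s := by
  rw [get_file_basename_and_extension]
  unfold get_file_basename_and_extension_alt
  rw [stripGz_id s hend]
  by_cases hne : PySem.Str.rfind s "." ≠ -1
  · rcases rfind_cases s.toList ".".toList with hc | ⟨hnn, -, -⟩
    · exact absurd (by simpa using hc) hne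
    · have hd : 0 ≤ PySem.Str.rfind s "." := by simpa using hnn
      rw [dif_pos hne, dif_neg (no_gz_ext s hend _ hd), if_pos hne]
      have : PySem.Str.slice s (some 0) (some (PySem.Str.rfind s "."))
          = PySem.Str.slice s none (some (PySem.Str.rfind s ".")) := by
        simp [PySem.Str.slice]
      rw [this]
  · rw [dif_neg hne, if_neg hne]

theorem A_eq_alt (n : Nat) : ∀ (s : String), s.toList.length ≤ n →
    get_file_basename_and_extension s = get_file_basename_and_extension_alt s := by
  induction n with
  | zero =>
      intro s hlen
      apply A_eq_alt_no_gz
      cases hs : s.toList with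
      | cons c cs => rw [hs] at hlen; simp at hlen
      | nil =>
          simp only [PySem.Str.endswith_eq, hs]
          decide
  | succ n ih =>
      intro s hlen
      by_cases hend : PySem.Str.endswith s ".gz" = true
      · obtain ⟨t, ht⟩ : ∃ t, s.toList = t ++ ['.', 'g', 'z'] := by
          have := (PySem.Chars.endswith_iff s.toList ".gz".toList).mp (by simpa using hend)
          obtain ⟨t, ht⟩ := this
          exact ⟨t, by simpa using ht.symm⟩
        rw [A_step_gz s t ht]
        have hB : get_file_basename_and_extension_alt s
            = get_file_basename_and_extension_alt (String.ofList t) := by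
          unfold get_file_basename_and_extension_alt
          rw [B_step_gz s t ht]
        rw [hB]
        apply ih
        have h := congrArg List.length ht
        simp only [List.length_append, List.length_cons, List.length_nil] at h
        have hofl : (String.ofList t).toList = t := by simp
        rw [hofl]
        omega
      · exact A_eq_alt_no_gz s (by simpa using hend)

-- ===== VERDICT (by name: the statement is the Claim_ definition above) =====
theorem get_file_basename_and_extension_spec : Claim_equal_get_file_basename_and_extension := by
  intro name _
  unfold Spec_get_file_basename_and_extension
  exact A_eq_alt name.toList.length name le_rfl
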